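-- pv_equiv track=rewrite | github.com/2x-Hra/square_root | square_root.py | impossible_finder
-- ===== SOURCE A (Python) =====
-- def impossible_finder(arr):
--     '''
--         this function will find those sample that is impossible
--
--
--     '''
--     counter = 0
--     cycle_counter = 0
--
--     while ( counter < len(arr)):
--         len_el = len(arr[counter])
--         cycle_counter = 0
--         counter2 =0
--         if(len_el % 2 ==0): # agar cycle zowj bood
--             while( counter2 < len(arr)):
--                 if (len_el == len(arr[counter2])):
--                     cycle_counter += 1
--                 counter2 += 1
--             if(cycle_counter % 2 != 0):
--                 return False
--
--         counter += 1
--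
--     return True
-- ===== SOURCE B (Python) =====
-- def impossible_finder(arr):
--     odd = set()
--     for el in arr:
--         L = len(el)
--         if L % 2 == 0:
--             if L in odd:
--                 odd.discard(L)
--             else:
--                 odd.add(L)
--     return not odd
-- ===== Notes on version B (the rewrite author's own statement) =====
-- stated objective: faster
-- what changed: Replaces A's nested rescans (for each element, a full inner pass counting equal lengths) by a single pass that toggles each even length in a parity set and finally tests the set for emptiness.
import Mathlib
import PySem

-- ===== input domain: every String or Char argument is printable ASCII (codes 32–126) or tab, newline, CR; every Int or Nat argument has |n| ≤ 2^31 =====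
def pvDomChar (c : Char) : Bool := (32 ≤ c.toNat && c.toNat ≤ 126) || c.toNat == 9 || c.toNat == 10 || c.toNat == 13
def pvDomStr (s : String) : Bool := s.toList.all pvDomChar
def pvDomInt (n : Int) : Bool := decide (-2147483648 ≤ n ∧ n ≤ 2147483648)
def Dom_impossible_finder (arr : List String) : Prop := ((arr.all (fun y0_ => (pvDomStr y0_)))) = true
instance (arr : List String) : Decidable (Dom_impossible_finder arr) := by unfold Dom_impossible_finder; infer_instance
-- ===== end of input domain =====

-- B replaces A's per-element full rescan of the list (count equal lengths, test parity) by a single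
-- pass that toggles each even length in a parity set and finally tests the set for emptiness.

-- ===== PORT A =====
-- outer while walks the elements arr[counter]; the inner counting while is the foldl over arr
def impAGo (arr : List String) : List String → Bool
  | [] => true
  | s :: rest =>
    let len_el := s.toList.length
    if len_el % 2 == 0 then
      let cycle_counter := arr.foldl (fun acc t => if len_el == t.toList.length then acc + 1 else acc) 0
      if cycle_counter % 2 != 0 then false else impAGo arr rest
    else impAGo arr rest

def impossible_finder (arr : List String) : Bool := impAGo arr arr

-- ===== PORT B =====
-- one toggle step of B's loop: if L = len(el) is even, discard L if present else add it
def impBStep (st : PySem.Set Nat) (s : String) : PySem.Set Nat :=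
  let L := s.toList.length
  if L % 2 == 0 then
    if PySem.Set.contains st L then PySem.Set.discard st L else PySem.Set.add st L
  else st

def impossible_finder_alt (arr : List String) : Bool :=
  (arr.foldl impBStep PySem.Set.empty).isEmpty

-- ===== PRECONDITION & SPEC =====
def Spec_impossible_finder (arr : List String) (out : Bool) : Prop := out = impossible_finder_alt arr
instance (arr : List String) (out : Bool) : Decidable (Spec_impossible_finder arr out) := by unfold Spec_impossible_finder; infer_instance

-- ===== CLAIM (what is proved, stated in full; the proofs are below) =====
def Claim_equal_impossible_finder : Prop := ∀ (arr : List String), Dom_impossible_finder arr → Spec_impossible_finder arr (impossible_finder arr)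

-- ===== LEMMAS AND PROOFS =====

lemma impBStep_eq (st : PySem.Set Nat) (s : String) :
    impBStep st s = if s.toList.length % 2 == 0 then
      (if PySem.Set.contains st s.toList.length then PySem.Set.discard st s.toList.length
       else PySem.Set.add st s.toList.length) else st := rfl

lemma impA_count_gen (arr : List String) (L : Nat) : ∀ n : Nat,
    arr.foldl (fun acc t => if L == t.toList.length then acc + 1 else acc) n
      = n + arr.countP (fun t => L == t.toList.length) := by
  induction arr with
  | nil => simp
  | cons s rest ih =>
    intro n
    rw [List.foldl_cons, ih, List.countP_cons]
    split_ifs <;> simp_all <;> omega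

lemma impA_key (b : Bool) (L n : Nat) :
    (if L % 2 == 0 then (if n % 2 != 0 then false else b) else b)
      = ((!decide (L % 2 = 0 ∧ n % 2 = 1)) && b) := by
  have h2 : n % 2 = 0 ∨ n % 2 = 1 := by omega
  have h1 : L % 2 = 0 ∨ L % 2 = 1 := by omega
  rcases h1 with h | h <;> rcases h2 with hn | hn <;> simp only [h, hn] <;> cases b <;> decide

lemma impAGo_eq_all (arr : List String) (rest : List String) :
    impAGo arr rest
      = rest.all (fun s => !(decide (s.toList.length % 2 = 0
          ∧ (arr.countP (fun t => s.toList.length == t.toList.length)) % 2 = 1))) := by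
  induction rest with
  | nil => rfl
  | cons s rest ih =>
    rw [List.all_cons, ← ih]
    show (if s.toList.length % 2 == 0 then _ else _) = _
    rw [impA_count_gen arr s.toList.length 0, Nat.zero_add]
    exact impA_key (impAGo arr rest) s.toList.length _

lemma impB_fold_mem (p : List String) :
    ∀ (st : PySem.Set Nat), st.Nodup → ∀ (L : Nat),
      (L ∈ p.foldl impBStep st
        ↔ ((L ∈ st) ↔ ¬ (L % 2 = 0 ∧ (p.countP (fun t => L == t.toList.length)) % 2 = 1))) := by
  induction p with
  | nil =>
    intro st _ L
    simp
  | cons s rest ih =>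
    intro st hnd L
    rw [List.foldl_cons, List.countP_cons]
    have hst' : (impBStep st s).Nodup := by
      rw [impBStep_eq]; split_ifs
      · exact PySem.Set.nodup_discard _ _ hnd
      · exact PySem.Set.nodup_add _ _ hnd
      · exact hnd
    rw [ih (impBStep st s) hst' L]
    by_cases hEq : L = s.toList.length
    · by_cases hK : s.toList.length % 2 = 0
      · have hmem : (L ∈ impBStep st s) ↔ ¬ (L ∈ st) := by
          rw [impBStep_eq, if_pos (by simpa using hK), ← hEq]
          by_cases hin : L ∈ st
          · rw [if_pos (by simpa [PySem.Set.contains_iff] using hin)]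
            simp [PySem.Set.mem_discard, hin]
          · rw [if_neg (by simpa [PySem.Set.contains_iff] using hin)]
            simp [hin]
        have hpred : (L == s.toList.length) = true := by simp [hEq]
        have hL2 : L % 2 = 0 := by rw [hEq]; exact hK
        rw [hmem]
        have hpar : ((rest.countP (fun t => L == t.toList.length) + 1) % 2 = 1)
            ↔ ¬ (rest.countP (fun t => L == t.toList.length) % 2 = 1) := by omega
        simp only [hpred, if_true, hL2, true_and]
        tauto
      · have hmem : impBStep st s = st := by
          rw [impBStep_eq, if_neg (by simpa using hK)]
        have hL2 : ¬ (L % 2 = 0) := by rw [hEq]; exact hK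
        rw [hmem]
        tauto
    · have hEq' : ¬ L = s.length := by simpa using hEq
      have hpred : (L == s.toList.length) = false := by simp [hEq']
      have hmem : (L ∈ impBStep st s) ↔ L ∈ st := by
        rw [impBStep_eq]
        split_ifs
        · simp [PySem.Set.mem_discard, hEq']
        · simp [PySem.Set.mem_add, hEq']
        · tauto
      rw [hmem]
      simp [hEq']

lemma impA_eq_impB (arr : List String) :
    impAGo arr arr = (arr.foldl impBStep PySem.Set.empty).isEmpty := by
  have hBmem : ∀ L : Nat, L ∈ arr.foldl impBStep PySem.Set.empty
      ↔ (L % 2 = 0 ∧ arr.countP (fun t => L == t.toList.length) % 2 = 1) := by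
    intro L
    rw [impB_fold_mem arr PySem.Set.empty (by simp [PySem.Set.empty]) L]
    simp [PySem.Set.empty]
  rw [impAGo_eq_all arr arr, Bool.eq_iff_iff, List.all_eq_true, List.isEmpty_iff,
      List.eq_nil_iff_forall_not_mem]
  constructor
  · intro hall L hL
    rw [hBmem L] at hL
    obtain ⟨h2, hc⟩ := hL
    have hpos : 0 < arr.countP (fun t => L == t.toList.length) := by omega
    rw [List.countP_pos_iff] at hpos
    obtain ⟨s, hs, hls⟩ := hpos
    have := hall s hs
    simp only [beq_iff_eq] at hls
    subst hls
    simp at h2 hc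
    simp at this
    rcases this with h | h <;> omega
  · intro hemp s hs
    by_contra h
    simp only [Bool.not_eq_true', Bool.not_eq_false] at h
    rw [decide_eq_true_iff] at h
    exact hemp s.toList.length ((hBmem s.toList.length).2 ⟨h.1, h.2⟩)

-- ===== VERDICT (by name: the statement is the Claim_ definition above) =====
theorem impossible_finder_spec : Claim_equal_impossible_finder := by
  intro arr _
  unfold Spec_impossible_finder impossible_finder impossible_finder_alt
  exact impA_eq_impB arr
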